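-- pv_equiv track=rewrite | github.com/dmed256/coding-puzzles | 2020/04.py | get_passports
-- ===== SOURCE A (Python) =====
-- def get_passports(lines):
--     passports = [[]]
--     for line in lines:
--         if line:
--             passports[-1].append(line)
--         else:
--             passports[-1] = ' '.join(passports[-1])
--             passports.append([])
--     passports[-1] = ' '.join(passports[-1])
--
--     return [
--         {
--             kv[0]: kv[1]
--             for info in p.split(' ')
--             if (kv := info.split(':'))
--             if kv[1]
--         }
--         for p in passports
--         if p
--     ]
-- ===== SOURCE B (Python) =====
-- def get_passports(lines):
--     passports = []
--     current = {}
--     started = False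
--     for line in lines:
--         if line:
--             started = True
--             for info in line.split(' '):
--                 kv = info.split(':')
--                 if kv[1]:
--                     current[kv[0]] = kv[1]
--         else:
--             if started:
--                 passports.append(current)
--                 current = {}
--                 started = False
--     if started:
--         passports.append(current)
--     return passports
-- ===== Notes on version B (the rewrite author's own statement) =====
-- stated objective: alternative
-- what changed: B replaces A's two-phase pipeline (group lines into joined strings, then a nested dict-comprehension over each joined group) with a single streaming pass over the lines that parses each line's tokens into the current dict as it goes, flushing on blank lines via a started flag.
import Mathlib
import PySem

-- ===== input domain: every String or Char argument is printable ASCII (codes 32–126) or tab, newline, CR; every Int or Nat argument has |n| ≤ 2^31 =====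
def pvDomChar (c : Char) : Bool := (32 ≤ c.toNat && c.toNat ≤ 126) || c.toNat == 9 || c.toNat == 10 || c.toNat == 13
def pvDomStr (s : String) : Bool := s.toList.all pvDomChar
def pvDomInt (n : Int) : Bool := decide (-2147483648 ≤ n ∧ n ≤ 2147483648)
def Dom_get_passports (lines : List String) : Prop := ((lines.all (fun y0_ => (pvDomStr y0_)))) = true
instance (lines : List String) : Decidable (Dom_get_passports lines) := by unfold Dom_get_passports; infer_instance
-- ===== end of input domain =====

-- B interleaves grouping and parsing in ONE streaming pass (dict + started flag) instead of A's
-- two-phase group-join-then-comprehend pipeline; equal return value on Pre_ (where A raises no IndexError).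

-- ===== PORT A =====
-- the dict-comprehension body: kv = info.split(':'); 'if kv' (split never returns []); 'if kv[1]' (IndexError when there is no ':')
def pvFieldA (d : PySem.Dict String String) (info : String) : PySem.Dict String String :=
  let kv := (PySem.Str.split? info ":").getD []      -- exact: sep ":" ≠ "" so split? is `some`
  if kv ≠ [] then
    match PySem.List.pyGet? kv 1 with
    | some v => if v ≠ "" then PySem.Dict.insert d (kv.headD "") v else d   -- kv[0] exists since kv ≠ []
    | none => d      -- Python raises IndexError here; Pre_get_passports excludes these inputs
  else d

def get_passports (lines : List String) : List (List (String × String)) :=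
  -- passports = [[]]; for line: append to passports[-1] or join-and-start-new; modelled as (finished joined strings, current group)
  let st := lines.foldl
    (fun (st : List String × List String) line =>
      if line ≠ "" then (st.1, st.2 ++ [line])
      else (st.1 ++ [PySem.Str.join " " st.2], []))
    ([], [])
  let passports := st.1 ++ [PySem.Str.join " " st.2]
  (passports.filter (fun p => p ≠ "")).map
    (fun p => (((PySem.Str.split? p " ").getD []).foldl pvFieldA PySem.Dict.empty).items)

-- ===== PORT B =====
-- kv = info.split(':'); if kv[1]: current[kv[0]] = kv[1]
def pvFieldB (d : PySem.Dict String String) (info : String) : PySem.Dict String String :=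
  match (PySem.Str.split? info ":").getD [] with   -- exact: sep ":" ≠ ""
  | k :: v :: _ => if v ≠ "" then PySem.Dict.insert d k v else d
  | _ => d      -- Python raises IndexError (kv[1]) here; Pre_get_passports excludes these inputs

def get_passports_alt (lines : List String) : List (List (String × String)) :=
  -- one pass: (result, current dict, started flag)
  let st := lines.foldl
    (fun (st : List (List (String × String)) × PySem.Dict String String × Bool) line =>
      if line ≠ "" then
        (st.1, ((PySem.Str.split? line " ").getD []).foldl pvFieldB st.2.1, true)
      else if st.2.2 then (st.1 ++ [st.2.1.items], PySem.Dict.empty, false)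
      else st)
    ([], PySem.Dict.empty, false)
  if st.2.2 then st.1 ++ [st.2.1.items] else st.1

-- ===== PRECONDITION & SPEC =====
-- Pre_ excludes exactly the inputs on which A raises IndexError: a space-separated token of some
-- non-blank line without a ':' (including empty tokens from doubled/leading/trailing spaces).
def Pre_get_passports (lines : List String) : Prop :=
  ∀ line ∈ lines, line ≠ "" →
    ∀ info ∈ (PySem.Str.split? line " ").getD [],
      2 ≤ ((PySem.Str.split? info ":").getD []).length
instance (lines : List String) : Decidable (Pre_get_passports lines) := by
  unfold Pre_get_passports; infer_instance

def pvWitness_get_passports : List String :=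
  ["ecl:gry pid:860033327", "byr:1937", "", "", "iyr: hcl:#fffffd", "x:1 x:2"]

def Spec_get_passports (lines : List String) (out : List (List (String × String))) : Prop := out = get_passports_alt lines
instance (lines : List String) (out : List (List (String × String))) : Decidable (Spec_get_passports lines out) := by unfold Spec_get_passports; infer_instance

-- ===== CLAIM (what is proved, stated in full; the proofs are below) =====
def Claim_equal_get_passports : Prop := ∀ (lines : List String), Dom_get_passports lines → Pre_get_passports lines → Spec_get_passports lines (get_passports lines)

-- ===== LEMMAS AND PROOFS =====

-- the two per-token parsers are the same function
lemma pvField_eq : pvFieldA = pvFieldB := by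
  funext d info
  unfold pvFieldA pvFieldB
  cases h : (PySem.Str.split? info ":").getD [] with
  | nil => simp
  | cons k t =>
    cases t with
    | nil => simp [PySem.List.pyGet?, PySem.List.pyIdx?]
    | cons v rest => simp [PySem.List.pyGet?, PySem.List.pyIdx?]

-- specification of Chars.splitOn with a single-character separator
def pvSplitC (c : Char) : List Char → List Char → List (List Char)
  | [], cur => [cur.reverse]
  | x :: rest, cur => if x = c then cur.reverse :: pvSplitC c rest [] else pvSplitC c rest (x :: cur)

lemma pvSplitC_ne_nil (c : Char) (l cur : List Char) : pvSplitC c l cur ≠ [] := by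
  cases l with
  | nil => simp [pvSplitC]
  | cons x rest => unfold pvSplitC; split_ifs <;> simp_all [pvSplitC_ne_nil c rest]

lemma pvSplitOn_go_spec (c : Char) (l : List Char) :
    ∀ (fuel : Nat) (cur : List Char) (acc : List (List Char)), l.length < fuel →
    PySem.Chars.splitOn.go [c] fuel l cur acc = acc.reverse ++ pvSplitC c l cur := by
  induction l with
  | nil =>
    intro fuel cur acc h
    match fuel with
    | fuel + 1 => simp [PySem.Chars.splitOn.go, pvSplitC]
  | cons x rest ih =>
    intro fuel cur acc h
    match fuel with
    | fuel + 1 =>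
      rw [PySem.Chars.splitOn.go]
      by_cases hx : x = c
      · subst hx
        simp only [List.isPrefixOf, BEq.rfl, Bool.and_true, if_pos, List.length_cons,
          List.length_nil, Nat.zero_add, List.drop_succ_cons, List.drop_zero]
        rw [ih fuel [] (cur.reverse :: acc) (by simpa using Nat.lt_of_succ_lt_succ h)]
        simp [pvSplitC]
      · have : ([c].isPrefixOf (x :: rest)) = false := by
          simp [List.isPrefixOf]
          intro hcx; exact (hx hcx.symm).elim
        rw [this]
        simp only [Bool.false_eq_true, if_false]
        rw [ih fuel (x :: cur) acc (by simpa using Nat.lt_of_succ_lt_succ h)]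
        simp [pvSplitC, hx]

lemma pvSplitOn_single (c : Char) (s : List Char) :
    PySem.Chars.splitOn s [c] = pvSplitC c s [] := by
  unfold PySem.Chars.splitOn
  simpa using pvSplitOn_go_spec c s (s.length + 1) [] [] (by omega)

lemma pvSplitC_append (c : Char) (a b cur : List Char) :
    pvSplitC c (a ++ c :: b) cur = pvSplitC c a cur ++ pvSplitC c b [] := by
  induction a generalizing cur with
  | nil => simp [pvSplitC]
  | cons x rest ih =>
    simp only [List.cons_append, pvSplitC]
    split_ifs with hx <;> simp [ih]

lemma pvJoin_split (c : Char) (parts : List (List Char)) (h : parts ≠ []) :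
    PySem.Chars.splitOn (PySem.Chars.join [c] parts) [c]
      = parts.flatMap (fun p => PySem.Chars.splitOn p [c]) := by
  induction parts with
  | nil => exact absurd rfl h
  | cons p rest ih =>
    cases rest with
    | nil => simp [PySem.Chars.join_singleton]
    | cons q rest' =>
      rw [PySem.Chars.join_cons_cons]
      have : p ++ [c] ++ PySem.Chars.join [c] (q :: rest') = p ++ c :: PySem.Chars.join [c] (q :: rest') := by simp
      rw [this, pvSplitOn_single, pvSplitC_append, ← pvSplitOn_single, ← pvSplitOn_single,
        ih (by simp)]
      simp

-- Str-level split of a space-join is the flatMap of the splits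
lemma pvStrSplit_eq (s : String) :
    (PySem.Str.split? s " ").getD [] = (PySem.Chars.splitOn s.toList [' ']).map String.ofList := by
  simp [PySem.Str.split?, PySem.Chars.split?]

lemma pvStr_split_join (cur : List String) (h : cur ≠ []) :
    (PySem.Str.split? (PySem.Str.join " " cur) " ").getD []
      = cur.flatMap (fun l => (PySem.Str.split? l " ").getD []) := by
  rw [pvStrSplit_eq]
  have hj : (PySem.Str.join " " cur).toList = PySem.Chars.join [' '] (cur.map String.toList) := by
    simp [PySem.Str.join]
  rw [hj, pvJoin_split _ _ (by simpa using h)]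
  rw [List.flatMap_map, List.map_flatMap]
  simp only [pvStrSplit_eq]

lemma pvJoin_ne_empty (cur : List String) (h : cur ≠ []) (h2 : ∀ l ∈ cur, l ≠ "") :
    PySem.Str.join " " cur ≠ "" := by
  intro hcontra
  have : (PySem.Str.join " " cur).toList = [] := by rw [hcontra]; rfl
  rw [show (PySem.Str.join " " cur).toList = PySem.Chars.join [' '] (cur.map String.toList) by
    simp [PySem.Str.join]] at this
  match cur with
  | [p] =>
    simp [PySem.Chars.join_singleton, String.toList_eq_nil_iff] at this
    exact h2 p (by simp) this
  | p :: q :: rest =>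
    rw [List.map_cons, List.map_cons, PySem.Chars.join_cons_cons] at this
    simp at this

-- a single group: parsing the joined string equals folding the per-line token streams
def pvParse (tokens : List String) : PySem.Dict String String :=
  tokens.foldl pvFieldB PySem.Dict.empty

def pvTokensOf (cur : List String) : List String :=
  cur.flatMap (fun l => (PySem.Str.split? l " ").getD [])

-- proof-side views of the two loops
def pvAStep (st : List String × List String) (line : String) : List String × List String :=
  if line ≠ "" then (st.1, st.2 ++ [line]) else (st.1 ++ [PySem.Str.join " " st.2], [])

def pvParseStr (p : String) : List (String × String) :=
  (((PySem.Str.split? p " ").getD []).foldl pvFieldB PySem.Dict.empty).items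

def pvAOut (st : List String × List String) : List (List (String × String)) :=
  ((st.1 ++ [PySem.Str.join " " st.2]).filter (fun p => p ≠ "")).map pvParseStr

def pvBStep (st : List (List (String × String)) × PySem.Dict String String × Bool)
    (line : String) : List (List (String × String)) × PySem.Dict String String × Bool :=
  if line ≠ "" then
    (st.1, ((PySem.Str.split? line " ").getD []).foldl pvFieldB st.2.1, true)
  else if st.2.2 then (st.1 ++ [st.2.1.items], PySem.Dict.empty, false)
  else st

def pvBOut (st : List (List (String × String)) × PySem.Dict String String × Bool) :
    List (List (String × String)) :=
  if st.2.2 then st.1 ++ [st.2.1.items] else st.1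

-- B''s state that corresponds to A''s intermediate state (done, cur)
def pvBState (done cur : List String) :
    List (List (String × String)) × PySem.Dict String String × Bool :=
  ((done.filter (fun p => p ≠ "")).map pvParseStr, pvParse (pvTokensOf cur), decide (cur ≠ []))

-- the flushed group: parsing the space-join of cur equals the running dict of cur''s tokens
lemma pvFlush (cur : List String) (h : cur ≠ []) :
    pvParseStr (PySem.Str.join " " cur) = (pvParse (pvTokensOf cur)).items := by
  unfold pvParseStr pvParse pvTokensOf
  rw [pvStr_split_join cur h]

-- main loop invariant
lemma pvMain (lines : List String) : ∀ (done cur : List String), (∀ l ∈ cur, l ≠ "") →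
    pvAOut (lines.foldl pvAStep (done, cur)) = pvBOut (lines.foldl pvBStep (pvBState done cur)) := by
  induction lines with
  | nil =>
    intro done cur hcur
    simp only [List.foldl_nil]
    by_cases hc : cur = []
    · subst hc
      simp [pvAOut, pvBOut, pvBState, pvParse, pvTokensOf, PySem.Str.join, PySem.Chars.join_nil]
    · have hne := pvJoin_ne_empty cur hc hcur
      simp [pvAOut, pvBOut, pvBState, hne, hc, pvFlush cur hc]
  | cons line rest ih =>
    intro done cur hcur
    simp only [List.foldl_cons]
    by_cases hl : line = ""
    · subst hl
      have hstep : pvBStep (pvBState done cur) "" = pvBState (done ++ [PySem.Str.join " " cur]) [] := by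
        by_cases hc : cur = []
        · subst hc
          simp [pvBStep, pvBState, pvParse, pvTokensOf, PySem.Str.join, PySem.Chars.join_nil]
        · have hne := pvJoin_ne_empty cur hc hcur
          simp [pvBStep, pvBState, hc, hne, pvFlush cur hc, pvParse, pvTokensOf]
      rw [show pvAStep (done, cur) "" = (done ++ [PySem.Str.join " " cur], []) from by
        simp [pvAStep], hstep]
      exact ih _ [] (by simp)
    · have hstep : pvBStep (pvBState done cur) line = pvBState done (cur ++ [line]) := by
        simp only [pvBStep, pvBState, if_pos (by simpa using hl)]
        refine congrArg _ ?_
        have : pvTokensOf (cur ++ [line]) = pvTokensOf cur ++ (PySem.Str.split? line " ").getD [] := by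
          simp [pvTokensOf]
        simp [pvParse, this, List.foldl_append]
      rw [show pvAStep (done, cur) line = (done, cur ++ [line]) from by simp [pvAStep, hl], hstep]
      refine ih _ _ ?_
      intro l hldef
      rcases List.mem_append.mp hldef with h1 | h1
      · exact hcur l h1
      · simp only [List.mem_singleton] at h1
        subst h1; exact hl

-- ===== VERDICT (by name: the statement is the Claim_ definition above) =====
theorem get_passports_spec : Claim_equal_get_passports := by
  intro lines _hdom _hpre
  unfold Spec_get_passports get_passports get_passports_alt
  rw [pvField_eq]
  show pvAOut (lines.foldl pvAStep ([], [])) = pvBOut (lines.foldl pvBStep ([], PySem.Dict.empty, false))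
  exact pvMain lines [] [] (by simp)
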